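-- pv_equiv track=rewrite | github.com/gkbrk/python-jvm-interpreter | pyjvm/ClassFile.py | argumentCount
-- ===== SOURCE A (Python) =====
-- def argumentCount(desc):
--     arg = desc.split(')', 2)[0][1:]
--     i = 0
--
--     parsingClass = False
--     for c in arg:
--         if parsingClass:
--             if c == ';':
--                 parsingClass = False
--             continue
--         if c == 'L':
--             parsingClass = True
--         i += 1
--
--     return i
-- ===== SOURCE B (Python) =====
-- def argumentCount(desc):
--     arg = desc.split(')', 2)[0][1:]
--     n = 0
--     while arg:
--         if arg[0] == 'L':
--             k = arg.find(';')
--             arg = '' if k < 0 else arg[k + 1:]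
--         else:
--             arg = arg[1:]
--         n += 1
--     return n
-- ===== Notes on version B (the rewrite author's own statement) =====
-- stated objective: alternative
-- what changed: Replaces A's per-character boolean state machine (parsingClass flag) with a find-and-skip tokenizer: a while loop that consumes one primitive/array char at a time and skips a whole class name up to its terminating semicolon in one step via str.find.
import Mathlib
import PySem

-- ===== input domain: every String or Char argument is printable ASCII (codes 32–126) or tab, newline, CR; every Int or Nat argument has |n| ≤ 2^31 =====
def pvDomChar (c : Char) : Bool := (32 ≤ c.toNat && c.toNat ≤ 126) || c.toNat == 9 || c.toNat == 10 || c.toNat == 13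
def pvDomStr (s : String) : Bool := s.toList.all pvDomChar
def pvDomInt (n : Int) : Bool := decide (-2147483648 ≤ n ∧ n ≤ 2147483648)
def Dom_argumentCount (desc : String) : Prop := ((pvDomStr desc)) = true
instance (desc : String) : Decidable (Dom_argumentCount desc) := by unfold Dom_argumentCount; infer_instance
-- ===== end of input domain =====

-- B replaces A's per-character boolean state machine by a find-and-skip tokenizer (objective: alternative).

-- ===== PORT A =====
-- the for-loop's state is (parsingClass, i)
def argumentCountLoop (arg : List Char) : Bool × Int :=
  arg.foldl (fun (st : Bool × Int) c =>
      if st.1 then (if c = ';' then (false, st.2) else st)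
      else if c = 'L' then (true, st.2 + 1) else (false, st.2 + 1))
    (false, 0)

def argumentCount (desc : String) : Int :=
  -- desc.split(')', 2)[0]: split never returns an empty list, so [0] is its head
  let arg := PySem.List.slice ((PySem.Chars.splitOnMax desc.toList [')'] 2).headD []) (some 1) none
  (argumentCountLoop arg).2

-- ===== PORT B =====
def argumentCountAltLoop : List Char → Int → Int
  | [], n => n
  | c :: cs, n =>
    if c = 'L' then
      let k := PySem.Chars.find (c :: cs) [';']
      let arg' := if k < 0 then ([] : List Char) else PySem.List.slice (c :: cs) (some (k + 1)) none
      argumentCountAltLoop arg' (n + 1)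
    else
      argumentCountAltLoop cs (n + 1)
  termination_by cs _ => cs.length
  decreasing_by
  · split_ifs with h
    · simp
    · rw [PySem.List.slice_from (xs := c :: cs) (a := PySem.Chars.find (c :: cs) [';'] + 1) (by omega)]
      simp only [List.length_drop, List.length_cons]
      omega
  · simp

def argumentCount_alt (desc : String) : Int :=
  let arg := PySem.List.slice ((PySem.Chars.splitOnMax desc.toList [')'] 2).headD []) (some 1) none
  argumentCountAltLoop arg 0

-- ===== PRECONDITION & SPEC =====
def Spec_argumentCount (desc : String) (out : Int) : Prop := out = argumentCount_alt desc
instance (desc : String) (out : Int) : Decidable (Spec_argumentCount desc out) := by unfold Spec_argumentCount; infer_instance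

-- ===== CLAIM (what is proved, stated in full; the proofs are below) =====
def Claim_equal_argumentCount : Prop := ∀ (desc : String), Dom_argumentCount desc → Spec_argumentCount desc (argumentCount desc)

-- ===== LEMMAS AND PROOFS =====

-- A's loop in explicit-recursion form
def loopA : List Char → Bool → Int → Int
  | [], _, i => i
  | c :: cs, true, i => loopA cs (if c = ';' then false else true) i
  | c :: cs, false, i => if c = 'L' then loopA cs true (i + 1) else loopA cs false (i + 1)

theorem argumentCountLoop_eq' (arg : List Char) (b : Bool) (i : Int) :
    (arg.foldl (fun (st : Bool × Int) c =>
      if st.1 then (if c = ';' then (false, st.2) else st)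
      else if c = 'L' then (true, st.2 + 1) else (false, st.2 + 1)) (b, i)).2 = loopA arg b i := by
  induction arg generalizing b i with
  | nil => rfl
  | cons c cs ih =>
    cases b <;> by_cases h1 : c = ';' <;> by_cases h2 : c = 'L' <;>
      simp [loopA, h1, h2, ih]

theorem argumentCountLoop_eq (arg : List Char) :
    (argumentCountLoop arg).2 = loopA arg false 0 := argumentCountLoop_eq' arg false 0

-- skipping a class: A's parsing state consumes up to and including the first ';'
theorem loopA_true (cs : List Char) (i : Int) :
    loopA cs true i = loopA ((cs.dropWhile (· ≠ ';')).tail) false i := by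
  induction cs with
  | nil => rfl
  | cons d ds ih =>
    by_cases hd : d = ';'
    · simp [loopA, hd, List.dropWhile]
    · simp [loopA, hd, List.dropWhile, ih]

-- if the first k characters are not ';' and cs[k] is, dropWhile (· ≠ ';') is drop k
theorem dropWhile_eq_drop_of_first (cs : List Char) (k : Nat) (hk : k < cs.length)
    (hck : cs[k] = ';')
    (hbefore : ∀ i (h : i < k), cs[i]'(Nat.lt_trans h hk) ≠ ';') :
    cs.dropWhile (· ≠ ';') = cs.drop k := by
  induction cs generalizing k with
  | nil => simp at hk
  | cons c cs ih =>
    cases k with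
    | zero =>
      simp only [List.getElem_cons_zero] at hck
      simp [List.dropWhile, hck]
    | succ j =>
      have hc : c ≠ ';' := hbefore 0 (by omega)
      simp only [List.dropWhile, ne_eq, hc, not_false_eq_true, decide_true, List.drop_succ_cons]
      exact ih j (by simpa using hk) (by simpa using hck)
        (fun i h => by simpa using hbefore (i + 1) (by omega))

-- find-and-skip equals dropWhile-and-tail
theorem skip_eq (cs : List Char) :
    (if PySem.Chars.find cs [';'] < 0 then ([] : List Char)
     else PySem.List.slice cs (some (PySem.Chars.find cs [';'] + 1)) none)
    = (cs.dropWhile (· ≠ ';')).tail := by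
  by_cases hmem : (';' : Char) ∈ cs
  · have h0 : 0 ≤ PySem.Chars.find cs [';'] := by
      rw [PySem.Chars.find_nonneg_iff]
      exact (List.singleton_infix_iff _ _).mpr hmem
    obtain ⟨hpre, hmin⟩ := PySem.Chars.find_spec (s := cs) (sub := [';']) h0
    set k : Nat := (PySem.Chars.find cs [';']).toNat with hkdef
    have hfind : PySem.Chars.find cs [';'] = (k : Int) := by omega
    have hklen : k < cs.length := by
      obtain ⟨t, ht⟩ := hpre
      have := congrArg List.length ht
      simp only [List.singleton_append, List.length_cons, List.length_drop] at this
      omega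
    have hck : cs[k] = ';' := by
      have h3 : cs[k]? = some ';' := by
        obtain ⟨t, ht⟩ := hpre
        have h4 : cs.drop k = ';' :: t := by simpa using ht.symm
        have := List.getElem_cons_drop hklen
        rw [h4] at this
        simpa using congrArg (fun l => l.head?) this
      simpa [List.getElem?_eq_getElem hklen] using h3
    have hdw : cs.dropWhile (· ≠ ';') = cs.drop k := by
      refine dropWhile_eq_drop_of_first cs k hklen hck ?_
      intro i hik hcontra
      refine hmin i (by omega) ⟨cs.drop (i + 1), ?_⟩
      have hil : i < cs.length := by omega
      simp only [List.singleton_append]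
      rw [← List.getElem_cons_drop hil, hcontra]
    rw [if_neg (by omega), hfind]
    rw [PySem.List.slice_from (xs := cs) (a := (k : Int) + 1) (by positivity)]
    rw [hdw, List.tail_drop]
    have hnat : ((k : Int) + 1).toNat = k + 1 := by omega
    rw [hnat]
  · have hfind : PySem.Chars.find cs [';'] = -1 := by
      rw [PySem.Chars.find_eq_neg_one_iff, List.singleton_infix_iff]
      exact hmem
    rw [if_pos (by omega)]
    have hdw : cs.dropWhile (· ≠ ';') = [] := by
      rw [List.dropWhile_eq_nil_iff]
      intro x hx
      simp only [ne_eq, decide_not, Bool.not_eq_eq_eq_not, Bool.not_true]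
      exact decide_eq_false (fun h => hmem (h ▸ hx))
    rw [hdw]
    rfl

theorem main_loop_aux : ∀ (n : Nat) (cs : List Char), cs.length ≤ n →
    ∀ i, loopA cs false i = argumentCountAltLoop cs i := by
  intro n
  induction n with
  | zero =>
    intro cs h i
    have hnil : cs = [] := List.eq_nil_of_length_eq_zero (by omega)
    subst hnil
    simp [argumentCountAltLoop, loopA]
  | succ n ih =>
    intro cs h i
    match cs with
    | [] => simp [argumentCountAltLoop, loopA]
    | c :: cs' =>
      by_cases hc : c = 'L'
      · subst hc
        have h1 : loopA ('L' :: cs') false i = loopA cs' true (i + 1) := by simp [loopA]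
        rw [h1, loopA_true]
        have hlen : ((cs'.dropWhile (· ≠ ';')).tail).length ≤ n := by
          have hd := List.length_dropWhile_le (fun x => decide (x ≠ ';')) cs'
          have ht := List.length_tail (l := cs'.dropWhile (fun x => decide (x ≠ ';')))
          simp only [List.length_cons] at h
          omega
        rw [ih _ hlen]
        have h2 : (if PySem.Chars.find ('L' :: cs') [';'] < 0 then ([] : List Char)
            else PySem.List.slice ('L' :: cs') (some (PySem.Chars.find ('L' :: cs') [';'] + 1)) none)
            = (cs'.dropWhile (· ≠ ';')).tail := by
          rw [skip_eq ('L' :: cs')]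
          simp [List.dropWhile]
        rw [← h2]
        conv_rhs => rw [argumentCountAltLoop]
        simp
      · have h1 : loopA (c :: cs') false i = loopA cs' false (i + 1) := by simp [loopA, hc]
        rw [h1, ih cs' (by simp only [List.length_cons] at h; omega) (i + 1)]
        conv_rhs => rw [argumentCountAltLoop]
        simp [hc]

theorem main_loop (cs : List Char) (i : Int) : loopA cs false i = argumentCountAltLoop cs i :=
  main_loop_aux cs.length cs le_rfl i

theorem argumentCount_eq_alt (desc : String) : argumentCount desc = argumentCount_alt desc := by
  unfold argumentCount argumentCount_alt
  simp only [argumentCountLoop_eq, main_loop]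

-- ===== VERDICT (by name: the statement is the Claim_ definition above) =====
theorem argumentCount_spec : Claim_equal_argumentCount := by
  intro desc _
  unfold Spec_argumentCount
  exact argumentCount_eq_alt desc
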